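-- pv_equiv track=rewrite | github.com/Casualtek/Cyberwatch | review-month.py | count_by_region
-- ===== SOURCE A (Python) =====
-- def count_by_region(codes):
--     country_to_region = {
--         "AUS": "APAC","CXR": "APAC","CCK": "APAC","HMD": "APAC","NZL": "APAC","NFK": "APAC","KAZ": "APAC","KGZ": "APAC","TJK": "APAC","TKM": "APAC","UZB": "APAC","CHN": "APAC","HKG": "APAC","JPN": "APAC","PRK": "APAC","KOR": "APAC","MAC": "APAC","MNG": "APAC","TWN": "APAC","BLR": "Europe","BGR": "Europe","CZE": "Europe","HUN": "Europe","MDA": "Europe","POL": "Europe","ROU": "Europe","RUS": "Europe","SVK": "Europe","UKR": "Europe","AIA": "LATAM","ATG": "LATAM","ARG": "LATAM","ABW": "LATAM","BHS": "LATAM","BRB": "LATAM","BLZ": "LATAM","BOL": "LATAM","BES": "LATAM","BVT": "LATAM","BRA": "LATAM","CYM": "LATAM","CHL": "LATAM","COL": "LATAM","CRI": "LATAM","CUB": "LATAM","CUW": "LATAM","DMA": "LATAM","DOM": "LATAM","ECU": "LATAM","SLV": "LATAM","FLK": "LATAM","GUF": "LATAM","GRD": "LATAM","GLP": "LATAM","GTM":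 "LATAM","GUY": "LATAM","HTI": "LATAM","HND": "LATAM","JAM": "LATAM","MTQ": "LATAM","MEX": "LATAM","MSR": "LATAM","NIC": "LATAM","PAN": "LATAM","PRY": "LATAM","PER": "LATAM","PRI": "LATAM","BLM": "LATAM","KNA": "LATAM","LCA": "LATAM","MAF": "LATAM","VCT": "LATAM","SXM": "LATAM","SGS": "LATAM","SUR": "LATAM","TTO": "LATAM","TCA": "LATAM","URY": "LATAM","VEN": "LATAM","VGB": "LATAM","VIR": "LATAM","FJI": "APAC","NCL": "APAC","PNG": "APAC","SLB": "APAC","VUT": "APAC","GUM": "APAC","KIR": "APAC","MHL": "APAC","FSM": "APAC","NRU": "APAC","MNP": "APAC","PLW": "APAC","UMI": "APAC","DZA": "MEA","EGY": "MEA","LBY": "MEA","MAR": "MEA","SDN": "MEA","TUN": "MEA","ESH": "MEA","BMU": "Northern America","CAN": "Northern America","GRL": "Northern America","SPM": "Northern America","USA": "Northern America","ALA": "Europe","DNK": "Europe","EST": "Europe","FRO": "Europe","FIN": "Europe","GGY": "Europe","ISL": "Europe","IRL": "Europe","IMN": "Europe","JEY": "Europe","LVA": "Europe","LTU": "Europe","NOR":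 "Europe","SJM": "Europe","SWE": "Europe","GBR": "Europe","ASM": "APAC","COK": "APAC","PYF": "APAC","NIU": "APAC","PCN": "APAC","WSM": "APAC","TKL": "APAC","TON": "APAC","TUV": "APAC","WLF": "APAC","BRN": "APAC","KHM": "APAC","IDN": "APAC","LAO": "APAC","MYS": "APAC","MMR": "APAC","PHL": "APAC","SGP": "APAC","THA": "APAC","TLS": "APAC","VNM": "APAC","AFG": "APAC","BGD": "APAC","BTN": "APAC","IND": "APAC","IRN": "APAC","MDV": "APAC","NPL": "APAC","PAK": "APAC","LKA": "APAC","ALB": "Europe","AND": "Europe","BIH": "Europe","HRV": "Europe","GIB": "Europe","GRC": "Europe","VAT": "Europe","ITA": "Europe","MLT": "Europe","MNE": "Europe","MKD": "Europe","PRT": "Europe","SMR": "Europe","SRB": "Europe","SVN": "Europe","ESP": "Europe","AGO": "MEA","BEN": "MEA","BWA": "MEA","IOT": "MEA","BFA": "MEA","BDI": "MEA","CPV": "MEA","CMR": "MEA","CAF": "MEA","TCD": "MEA","COM": "MEA","COG": "MEA","COD": "MEA","CIV": "MEA","DJI": "MEA","GNQ": "MEA","ERI": "MEA","SWZ": "MEA","ETH":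 "MEA","ATF": "MEA","GAB": "MEA","GMB": "MEA","GHA": "MEA","GIN": "MEA","GNB": "MEA","KEN": "MEA","LSO": "MEA","LBR": "MEA","MDG": "MEA","MWI": "MEA","MLI": "MEA","MRT": "MEA","MUS": "MEA","MYT": "MEA","MOZ": "MEA","NAM": "MEA","NER": "MEA","NGA": "MEA","REU": "MEA","RWA": "MEA","SHN": "MEA","STP": "MEA","SEN": "MEA","SYC": "MEA","SLE": "MEA","SOM": "MEA","ZAF": "MEA","SSD": "MEA","TZA": "MEA","TGO": "MEA","UGA": "MEA","ZMB": "MEA","ZWE": "MEA","ARM": "MEA","AZE": "MEA","BHR": "MEA","CYP": "MEA","GEO": "MEA","IRQ": "MEA","ISR": "MEA","JOR": "MEA","KWT": "MEA","LBN": "MEA","OMN": "MEA","PSE": "MEA","QAT": "MEA","SAU": "MEA","SYR": "MEA","TUR": "MEA","ARE": "MEA","YEM": "MEA","AUT": "Europe","BEL": "Europe","FRA": "Europe","DEU": "Europe","LIE": "Europe","LUX": "Europe","MCO": "Europe","NLD": "Europe","CHE": "Europe"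
--     }
--     region_counts = {"Northern America": 0, "LATAM": 0, "APAC": 0, "Europe": 0, "MEA": 0}
--     for code in codes:
--         region = country_to_region.get(code)
--         if region is not None:
--             region_counts[region] += 1
--     return region_counts
-- ===== SOURCE B (Python) =====
-- def count_by_region(codes):
--     # index-first: tally the input once, then total each region over its own member list
--     region_members = {
--         "Northern America": "BMU CAN GRL SPM USA".split(),
--         "LATAM": "AIA ATG ARG ABW BHS BRB BLZ BOL BES BVT BRA CYM CHL COL CRI CUB CUW DMA DOM ECU SLV FLK GUF GRD GLP GTM GUY HTI HND JAM MTQ MEX MSR NIC PAN PRY PER PRI BLM KNA LCA MAF VCT SXM SGS SUR TTO TCA URY VEN VGB VIR".split(),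
--         "APAC": "AUS CXR CCK HMD NZL NFK KAZ KGZ TJK TKM UZB CHN HKG JPN PRK KOR MAC MNG TWN FJI NCL PNG SLB VUT GUM KIR MHL FSM NRU MNP PLW UMI ASM COK PYF NIU PCN WSM TKL TON TUV WLF BRN KHM IDN LAO MYS MMR PHL SGP THA TLS VNM AFG BGD BTN IND IRN MDV NPL PAK LKA".split(),
--         "Europe": "BLR BGR CZE HUN MDA POL ROU RUS SVK UKR ALA DNK EST FRO FIN GGY ISL IRL IMN JEY LVA LTU NOR SJM SWE GBR ALB AND BIH HRV GIB GRC VAT ITA MLT MNE MKD PRT SMR SRB SVN ESP AUT BEL FRA DEU LIE LUX MCO NLD CHE".split(),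
--         "MEA": "DZA EGY LBY MAR SDN TUN ESH AGO BEN BWA IOT BFA BDI CPV CMR CAF TCD COM COG COD CIV DJI GNQ ERI SWZ ETH ATF GAB GMB GHA GIN GNB KEN LSO LBR MDG MWI MLI MRT MUS MYT MOZ NAM NER NGA REU RWA SHN STP SEN SYC SLE SOM ZAF SSD TZA TGO UGA ZMB ZWE ARM AZE BHR CYP GEO IRQ ISR JOR KWT LBN OMN PSE QAT SAU SYR TUR ARE YEM".split(),
--     }
--     freq = {}
--     for code in codes:
--         freq[code] = freq.get(code, 0) + 1
--     return {region: sum(freq.get(c, 0) for c in members)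
--             for region, members in region_members.items()}
-- ===== Notes on version B (the rewrite author's own statement) =====
-- stated objective: alternative
-- what changed: B replaces A's scan-and-increment over the input (a 248-key dict lookup per code) by an index-first aggregation: it tallies the input codes into a frequency table in one pass, then builds the result dict directly by summing member-code frequencies over a precomputed region-to-members grouping; unmapped codes are simply never visited.
import Mathlib
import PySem

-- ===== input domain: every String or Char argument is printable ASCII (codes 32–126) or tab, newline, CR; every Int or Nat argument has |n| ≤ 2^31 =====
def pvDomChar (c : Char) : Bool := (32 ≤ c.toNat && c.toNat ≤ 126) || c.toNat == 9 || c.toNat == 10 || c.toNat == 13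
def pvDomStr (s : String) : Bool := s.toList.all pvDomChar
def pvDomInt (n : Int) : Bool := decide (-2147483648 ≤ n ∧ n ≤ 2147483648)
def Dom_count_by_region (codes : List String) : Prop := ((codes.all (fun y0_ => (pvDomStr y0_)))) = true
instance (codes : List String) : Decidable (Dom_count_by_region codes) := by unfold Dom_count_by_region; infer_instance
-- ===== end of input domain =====

-- B re-derives the same totals index-first (frequency table + per-region member lists); alternative decomposition, not faster.

-- ===== PORT A =====
-- the country->region dict literal of A (248 pairs, keys distinct)
def tableList : List (String × String) := [
  ("AUS", "APAC"), ("CXR", "APAC"), ("CCK", "APAC"), ("HMD", "APAC"), ("NZL", "APAC"), ("NFK", "APAC"),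
  ("KAZ", "APAC"), ("KGZ", "APAC"), ("TJK", "APAC"), ("TKM", "APAC"), ("UZB", "APAC"), ("CHN", "APAC"),
  ("HKG", "APAC"), ("JPN", "APAC"), ("PRK", "APAC"), ("KOR", "APAC"), ("MAC", "APAC"), ("MNG", "APAC"),
  ("TWN", "APAC"), ("BLR", "Europe"), ("BGR", "Europe"), ("CZE", "Europe"), ("HUN", "Europe"), ("MDA", "Europe"),
  ("POL", "Europe"), ("ROU", "Europe"), ("RUS", "Europe"), ("SVK", "Europe"), ("UKR", "Europe"), ("AIA", "LATAM"),
  ("ATG", "LATAM"), ("ARG", "LATAM"), ("ABW", "LATAM"), ("BHS", "LATAM"), ("BRB", "LATAM"), ("BLZ", "LATAM"),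
  ("BOL", "LATAM"), ("BES", "LATAM"), ("BVT", "LATAM"), ("BRA", "LATAM"), ("CYM", "LATAM"), ("CHL", "LATAM"),
  ("COL", "LATAM"), ("CRI", "LATAM"), ("CUB", "LATAM"), ("CUW", "LATAM"), ("DMA", "LATAM"), ("DOM", "LATAM"),
  ("ECU", "LATAM"), ("SLV", "LATAM"), ("FLK", "LATAM"), ("GUF", "LATAM"), ("GRD", "LATAM"), ("GLP", "LATAM"),
  ("GTM", "LATAM"), ("GUY", "LATAM"), ("HTI", "LATAM"), ("HND", "LATAM"), ("JAM", "LATAM"), ("MTQ", "LATAM"),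
  ("MEX", "LATAM"), ("MSR", "LATAM"), ("NIC", "LATAM"), ("PAN", "LATAM"), ("PRY", "LATAM"), ("PER", "LATAM"),
  ("PRI", "LATAM"), ("BLM", "LATAM"), ("KNA", "LATAM"), ("LCA", "LATAM"), ("MAF", "LATAM"), ("VCT", "LATAM"),
  ("SXM", "LATAM"), ("SGS", "LATAM"), ("SUR", "LATAM"), ("TTO", "LATAM"), ("TCA", "LATAM"), ("URY", "LATAM"),
  ("VEN", "LATAM"), ("VGB", "LATAM"), ("VIR", "LATAM"), ("FJI", "APAC"), ("NCL", "APAC"), ("PNG", "APAC"),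
  ("SLB", "APAC"), ("VUT", "APAC"), ("GUM", "APAC"), ("KIR", "APAC"), ("MHL", "APAC"), ("FSM", "APAC"),
  ("NRU", "APAC"), ("MNP", "APAC"), ("PLW", "APAC"), ("UMI", "APAC"), ("DZA", "MEA"), ("EGY", "MEA"),
  ("LBY", "MEA"), ("MAR", "MEA"), ("SDN", "MEA"), ("TUN", "MEA"), ("ESH", "MEA"), ("BMU", "Northern America"),
  ("CAN", "Northern America"), ("GRL", "Northern America"), ("SPM", "Northern America"), ("USA", "Northern America"), ("ALA", "Europe"), ("DNK", "Europe"),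
  ("EST", "Europe"), ("FRO", "Europe"), ("FIN", "Europe"), ("GGY", "Europe"), ("ISL", "Europe"), ("IRL", "Europe"),
  ("IMN", "Europe"), ("JEY", "Europe"), ("LVA", "Europe"), ("LTU", "Europe"), ("NOR", "Europe"), ("SJM", "Europe"),
  ("SWE", "Europe"), ("GBR", "Europe"), ("ASM", "APAC"), ("COK", "APAC"), ("PYF", "APAC"), ("NIU", "APAC"),
  ("PCN", "APAC"), ("WSM", "APAC"), ("TKL", "APAC"), ("TON", "APAC"), ("TUV", "APAC"), ("WLF", "APAC"),
  ("BRN", "APAC"), ("KHM", "APAC"), ("IDN", "APAC"), ("LAO", "APAC"), ("MYS", "APAC"), ("MMR", "APAC"),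
  ("PHL", "APAC"), ("SGP", "APAC"), ("THA", "APAC"), ("TLS", "APAC"), ("VNM", "APAC"), ("AFG", "APAC"),
  ("BGD", "APAC"), ("BTN", "APAC"), ("IND", "APAC"), ("IRN", "APAC"), ("MDV", "APAC"), ("NPL", "APAC"),
  ("PAK", "APAC"), ("LKA", "APAC"), ("ALB", "Europe"), ("AND", "Europe"), ("BIH", "Europe"), ("HRV", "Europe"),
  ("GIB", "Europe"), ("GRC", "Europe"), ("VAT", "Europe"), ("ITA", "Europe"), ("MLT", "Europe"), ("MNE", "Europe"),
  ("MKD", "Europe"), ("PRT", "Europe"), ("SMR", "Europe"), ("SRB", "Europe"), ("SVN", "Europe"), ("ESP", "Europe"),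
  ("AGO", "MEA"), ("BEN", "MEA"), ("BWA", "MEA"), ("IOT", "MEA"), ("BFA", "MEA"), ("BDI", "MEA"),
  ("CPV", "MEA"), ("CMR", "MEA"), ("CAF", "MEA"), ("TCD", "MEA"), ("COM", "MEA"), ("COG", "MEA"),
  ("COD", "MEA"), ("CIV", "MEA"), ("DJI", "MEA"), ("GNQ", "MEA"), ("ERI", "MEA"), ("SWZ", "MEA"),
  ("ETH", "MEA"), ("ATF", "MEA"), ("GAB", "MEA"), ("GMB", "MEA"), ("GHA", "MEA"), ("GIN", "MEA"),
  ("GNB", "MEA"), ("KEN", "MEA"), ("LSO", "MEA"), ("LBR", "MEA"), ("MDG", "MEA"), ("MWI", "MEA"),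
  ("MLI", "MEA"), ("MRT", "MEA"), ("MUS", "MEA"), ("MYT", "MEA"), ("MOZ", "MEA"), ("NAM", "MEA"),
  ("NER", "MEA"), ("NGA", "MEA"), ("REU", "MEA"), ("RWA", "MEA"), ("SHN", "MEA"), ("STP", "MEA"),
  ("SEN", "MEA"), ("SYC", "MEA"), ("SLE", "MEA"), ("SOM", "MEA"), ("ZAF", "MEA"), ("SSD", "MEA"),
  ("TZA", "MEA"), ("TGO", "MEA"), ("UGA", "MEA"), ("ZMB", "MEA"), ("ZWE", "MEA"), ("ARM", "MEA"),
  ("AZE", "MEA"), ("BHR", "MEA"), ("CYP", "MEA"), ("GEO", "MEA"), ("IRQ", "MEA"), ("ISR", "MEA"),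
  ("JOR", "MEA"), ("KWT", "MEA"), ("LBN", "MEA"), ("OMN", "MEA"), ("PSE", "MEA"), ("QAT", "MEA"),
  ("SAU", "MEA"), ("SYR", "MEA"), ("TUR", "MEA"), ("ARE", "MEA"), ("YEM", "MEA"), ("AUT", "Europe"),
  ("BEL", "Europe"), ("FRA", "Europe"), ("DEU", "Europe"), ("LIE", "Europe"), ("LUX", "Europe"), ("MCO", "Europe"),
  ("NLD", "Europe"), ("CHE", "Europe")]

-- body of A's `for code in codes` loop: look the code up, bump its region if mapped.
-- `region_counts[region] += 1` is ported as Dict.modify; the looked-up region is always a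
-- value of the table and hence a key of region_counts, so Python's KeyError never fires.
def stepA (d : PySem.Dict String Int) (code : String) : PySem.Dict String Int :=
  match (PySem.Dict.mk tableList).get? code with
  | none => d
  | some region => d.modify region 0 (· + 1)

def count_by_region (codes : List String) : List (String × Int) :=
  let regionCounts : PySem.Dict String Int :=
    PySem.Dict.mk [("Northern America", 0), ("LATAM", 0), ("APAC", 0), ("Europe", 0), ("MEA", 0)]
  (codes.foldl stepA regionCounts).items

-- ===== PORT B =====
-- B tallies the input once into a frequency table, then builds the result dict directly:
-- each region's total is the sum of the frequencies of its own member codes (kept, as in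
-- Source B, as one whitespace-split string per region). The dict comprehension is ported as a
-- map over the five (region, members) pairs; the five keys are distinct literals.
def count_by_region_alt (codes : List String) : List (String × Int) :=
  let regionMembers : List (String × List String) :=
    [("Northern America", PySem.Str.split₀ "BMU CAN GRL SPM USA"),
     ("LATAM", PySem.Str.split₀ "AIA ATG ARG ABW BHS BRB BLZ BOL BES BVT BRA CYM CHL COL CRI CUB CUW DMA DOM ECU SLV FLK GUF GRD GLP GTM GUY HTI HND JAM MTQ MEX MSR NIC PAN PRY PER PRI BLM KNA LCA MAF VCT SXM SGS SUR TTO TCA URY VEN VGB VIR"),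
     ("APAC", PySem.Str.split₀ "AUS CXR CCK HMD NZL NFK KAZ KGZ TJK TKM UZB CHN HKG JPN PRK KOR MAC MNG TWN FJI NCL PNG SLB VUT GUM KIR MHL FSM NRU MNP PLW UMI ASM COK PYF NIU PCN WSM TKL TON TUV WLF BRN KHM IDN LAO MYS MMR PHL SGP THA TLS VNM AFG BGD BTN IND IRN MDV NPL PAK LKA"),
     ("Europe", PySem.Str.split₀ "BLR BGR CZE HUN MDA POL ROU RUS SVK UKR ALA DNK EST FRO FIN GGY ISL IRL IMN JEY LVA LTU NOR SJM SWE GBR ALB AND BIH HRV GIB GRC VAT ITA MLT MNE MKD PRT SMR SRB SVN ESP AUT BEL FRA DEU LIE LUX MCO NLD CHE"),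
     ("MEA", PySem.Str.split₀ "DZA EGY LBY MAR SDN TUN ESH AGO BEN BWA IOT BFA BDI CPV CMR CAF TCD COM COG COD CIV DJI GNQ ERI SWZ ETH ATF GAB GMB GHA GIN GNB KEN LSO LBR MDG MWI MLI MRT MUS MYT MOZ NAM NER NGA REU RWA SHN STP SEN SYC SLE SOM ZAF SSD TZA TGO UGA ZMB ZWE ARM AZE BHR CYP GEO IRQ ISR JOR KWT LBN OMN PSE QAT SAU SYR TUR ARE YEM")]
  let freq : PySem.Dict String Int :=
    codes.foldl (fun d code => d.insert code (d.getD code 0 + 1)) PySem.Dict.empty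
  regionMembers.map (fun p => (p.1, (p.2.map (fun c => freq.getD c 0)).sum))

-- ===== PRECONDITION & SPEC =====
def Spec_count_by_region (codes : List String) (out : List (String × Int)) : Prop := out = count_by_region_alt codes
instance (codes : List String) (out : List (String × Int)) : Decidable (Spec_count_by_region codes out) := by unfold Spec_count_by_region; infer_instance

-- ===== CLAIM (what is proved, stated in full; the proofs are below) =====
def Claim_equal_count_by_region : Prop := ∀ (codes : List String), Dom_count_by_region codes → Spec_count_by_region codes (count_by_region codes)

-- ===== LEMMAS AND PROOFS =====

-- proof-side abbreviation for the five-region counter dict with arbitrary values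
def mk5 (a b c d e : Int) : PySem.Dict String Int :=
  PySem.Dict.mk [("Northern America", a), ("LATAM", b), ("APAC", c), ("Europe", d), ("MEA", e)]

-- number of input codes that the table maps to region r
def cnt (r : String) (codes : List String) : Int :=
  (codes.countP (fun c => (PySem.Dict.mk tableList).get? c == some r) : Int)

-- sum of g over the table codes of region r
def S (r : String) (g : String → Int) (L : List (String × String)) : Int :=
  ((L.filter (fun p => p.2 == r)).map (fun p => g p.1)).sum

set_option maxRecDepth 100000 in
lemma table_vals : tableList.all (fun p =>
    p.2 == "Northern America" || p.2 == "LATAM" || p.2 == "APAC" || p.2 == "Europe" || p.2 == "MEA") = true := by decide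

set_option maxRecDepth 100000 in
lemma table_nodup : (tableList.map Prod.fst).Nodup := by decide

lemma region_of_mem {p : String × String} (hp : p ∈ tableList) :
    p.2 = "Northern America" ∨ p.2 = "LATAM" ∨ p.2 = "APAC" ∨ p.2 = "Europe" ∨ p.2 = "MEA" := by
  have := List.all_eq_true.mp table_vals p hp
  simp only [Bool.or_eq_true, beq_iff_eq] at this
  tauto

lemma stepA_none {d : PySem.Dict String Int} {code : String}
    (h : (PySem.Dict.mk tableList).get? code = none) : stepA d code = d := by
  simp [stepA, h]

lemma stepA_some {d : PySem.Dict String Int} {code r : String}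
    (h : (PySem.Dict.mk tableList).get? code = some r) : stepA d code = d.modify r 0 (· + 1) := by
  simp [stepA, h]

lemma mk5_modify_NA (a b c d e g : Int) : (mk5 a b c d e).modify "Northern America" 0 (· + g) = mk5 (a+g) b c d e := rfl
lemma mk5_modify_LA (a b c d e g : Int) : (mk5 a b c d e).modify "LATAM" 0 (· + g) = mk5 a (b+g) c d e := rfl
lemma mk5_modify_AP (a b c d e g : Int) : (mk5 a b c d e).modify "APAC" 0 (· + g) = mk5 a b (c+g) d e := rfl
lemma mk5_modify_EU (a b c d e g : Int) : (mk5 a b c d e).modify "Europe" 0 (· + g) = mk5 a b c (d+g) e := rfl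
lemma mk5_modify_ME (a b c d e g : Int) : (mk5 a b c d e).modify "MEA" 0 (· + g) = mk5 a b c d (e+g) := rfl

lemma mk5_inj {a b c d e a' b' c' d' e' : Int} (h1 : a = a') (h2 : b = b') (h3 : c = c')
    (h4 : d = d') (h5 : e = e') : mk5 a b c d e = mk5 a' b' c' d' e' := by
  subst h1 h2 h3 h4 h5; rfl

lemma cnt_cons (r' x : String) (xs : List String) :
    cnt r' (x :: xs) = cnt r' xs + (if (PySem.Dict.mk tableList).get? x == some r' then 1 else 0) := by
  by_cases hb : ((PySem.Dict.mk tableList).get? x == some r') = true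
  · simp [cnt, hb]
  · simp [cnt, hb]

lemma A_loop (cs : List String) : ∀ a b c d e : Int,
    cs.foldl stepA (mk5 a b c d e)
    = mk5 (a + cnt "Northern America" cs) (b + cnt "LATAM" cs) (c + cnt "APAC" cs)
          (d + cnt "Europe" cs) (e + cnt "MEA" cs) := by
  induction cs with
  | nil => intro a b c d e; simp [cnt, mk5]
  | cons x xs ih =>
    intro a b c d e
    simp only [List.foldl_cons]
    rcases h : (PySem.Dict.mk tableList).get? x with _ | r
    · rw [stepA_none h, ih]
      refine mk5_inj ?_ ?_ ?_ ?_ ?_ <;> (simp [cnt_cons, h]; try ring)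
    · rw [stepA_some h]
      have hm : (x, r) ∈ tableList := PySem.Dict.mem_items_of_get?_eq_some _ h
      have hr := region_of_mem hm
      simp only at hr
      rcases hr with rfl | rfl | rfl | rfl | rfl <;>
        (simp only [mk5_modify_NA, mk5_modify_LA, mk5_modify_AP, mk5_modify_EU, mk5_modify_ME]
         rw [ih]
         refine mk5_inj ?_ ?_ ?_ ?_ ?_ <;> (simp [cnt_cons, h]; try ring))

lemma freq_getD (codes : List String) (v : String) :
    (codes.foldl (fun d code => d.insert code (d.getD code 0 + 1)) PySem.Dict.empty).getD v 0
    = (codes.count v : Int) := by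
  rw [PySem.Dict.getD_foldl_insert_add_one]
  simp

lemma ind_zero (r x : String) : ∀ L : List (String × String), x ∉ L.map Prod.fst →
    ((L.filter (fun p => p.2 == r)).map (fun p => (if x = p.1 then (1:Int) else 0))).sum = 0 := by
  intro L
  induction L with
  | nil => simp
  | cons p L ih =>
    intro hx
    simp only [List.map_cons, List.mem_cons, not_or] at hx
    rw [List.filter_cons]
    split
    · simp [hx.1, ih hx.2]
    · exact ih hx.2

lemma ind_gen (r x : String) : ∀ L : List (String × String), (L.map Prod.fst).Nodup →
    ((L.filter (fun p => p.2 == r)).map (fun p => (if x = p.1 then (1:Int) else 0))).sum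
    = if (x, r) ∈ L then 1 else 0 := by
  intro L
  induction L with
  | nil => simp
  | cons p L ih =>
    intro hnd
    simp only [List.map_cons, List.nodup_cons] at hnd
    rw [List.filter_cons]
    by_cases hx : p.1 = x
    · have hz := ind_zero r x L (by rw [← hx]; exact hnd.1)
      by_cases hvr : p.2 = r
      · have hp : p = (x, r) := by rw [← hx, ← hvr]
        subst hp
        simp [hz]
      · have hcond : (p.2 == r) = false := beq_eq_false_iff_ne.mpr hvr
        have hmem : (x, r) ∉ p :: L := by
          intro hc
          rcases List.mem_cons.mp hc with hc | hc
          · exact hvr (by rw [← hc])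
          · exact hnd.1 (by rw [hx]; exact List.mem_map_of_mem hc)
        simp [hcond, hz, hmem]
    · have h1 : ¬ x = p.1 := fun hc => hx hc.symm
      have hne : (x, r) ≠ p := fun hc => hx (by rw [← hc])
      have hiff : ((x, r) ∈ p :: L) ↔ ((x, r) ∈ L) :=
        ⟨fun hc => (List.mem_cons.mp hc).resolve_left hne, List.mem_cons_of_mem p⟩
      split
      · simp [h1, ih hnd.2, hiff]
      · simp [ih hnd.2, hiff]

lemma bridge (r : String) (codes : List String) :
    S r (fun c => (codes.count c : Int)) tableList = cnt r codes := by
  induction codes with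
  | nil => simp [S, cnt]
  | cons x cs ih =>
    rw [cnt_cons, ← ih]
    simp only [S, List.count_cons]
    push_cast
    rw [PySem.List.sum_map_add_int]
    simp only [beq_iff_eq]
    rw [ind_gen r x tableList table_nodup]
    congr 1
    by_cases hm : (x, r) ∈ tableList
    · have hg : (PySem.Dict.mk tableList).get? x = some r :=
        PySem.Dict.get?_of_mem_items _ hm table_nodup
      simp [hm, hg]
    · have hne : (PySem.Dict.mk tableList).get? x ≠ some r :=
        fun hc => hm (PySem.Dict.mem_items_of_get?_eq_some _ hc)
      simp [hm, hne]

-- each region's member list (the split of Source B's string) is exactly the table's codes of that region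
set_option maxRecDepth 1000000 in
lemma members_NA : PySem.Str.split₀ "BMU CAN GRL SPM USA" = ((tableList.filter (fun p => p.2 == "Northern America")).map Prod.fst) := by decide

set_option maxRecDepth 1000000 in
lemma members_LA : PySem.Str.split₀ "AIA ATG ARG ABW BHS BRB BLZ BOL BES BVT BRA CYM CHL COL CRI CUB CUW DMA DOM ECU SLV FLK GUF GRD GLP GTM GUY HTI HND JAM MTQ MEX MSR NIC PAN PRY PER PRI BLM KNA LCA MAF VCT SXM SGS SUR TTO TCA URY VEN VGB VIR" = ((tableList.filter (fun p => p.2 == "LATAM")).map Prod.fst) := by decide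

set_option maxRecDepth 1000000 in
lemma members_AP : PySem.Str.split₀ "AUS CXR CCK HMD NZL NFK KAZ KGZ TJK TKM UZB CHN HKG JPN PRK KOR MAC MNG TWN FJI NCL PNG SLB VUT GUM KIR MHL FSM NRU MNP PLW UMI ASM COK PYF NIU PCN WSM TKL TON TUV WLF BRN KHM IDN LAO MYS MMR PHL SGP THA TLS VNM AFG BGD BTN IND IRN MDV NPL PAK LKA" = ((tableList.filter (fun p => p.2 == "APAC")).map Prod.fst) := by decide

set_option maxRecDepth 1000000 in
lemma members_EU : PySem.Str.split₀ "BLR BGR CZE HUN MDA POL ROU RUS SVK UKR ALA DNK EST FRO FIN GGY ISL IRL IMN JEY LVA LTU NOR SJM SWE GBR ALB AND BIH HRV GIB GRC VAT ITA MLT MNE MKD PRT SMR SRB SVN ESP AUT BEL FRA DEU LIE LUX MCO NLD CHE" = ((tableList.filter (fun p => p.2 == "Europe")).map Prod.fst) := by decide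

set_option maxRecDepth 1000000 in
lemma members_ME : PySem.Str.split₀ "DZA EGY LBY MAR SDN TUN ESH AGO BEN BWA IOT BFA BDI CPV CMR CAF TCD COM COG COD CIV DJI GNQ ERI SWZ ETH ATF GAB GMB GHA GIN GNB KEN LSO LBR MDG MWI MLI MRT MUS MYT MOZ NAM NER NGA REU RWA SHN STP SEN SYC SLE SOM ZAF SSD TZA TGO UGA ZMB ZWE ARM AZE BHR CYP GEO IRQ ISR JOR KWT LBN OMN PSE QAT SAU SYR TUR ARE YEM" = ((tableList.filter (fun p => p.2 == "MEA")).map Prod.fst) := by decide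

lemma sum_members (r : String) (M : List String) (g : String → Int)
    (h : M = (tableList.filter (fun p => p.2 == r)).map Prod.fst) :
    (M.map g).sum = S r g tableList := by
  subst h
  simp only [S, List.map_map]
  rfl

-- ===== VERDICT (by name: the statement is the Claim_ definition above) =====
theorem count_by_region_spec : Claim_equal_count_by_region := by
  intro codes _
  unfold Spec_count_by_region
  simp only [count_by_region, count_by_region_alt, List.map, freq_getD]
  rw [show (PySem.Dict.mk [("Northern America", (0:Int)), ("LATAM", 0), ("APAC", 0), ("Europe", 0), ("MEA", 0)]) = mk5 0 0 0 0 0 from rfl]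
  rw [A_loop]
  rw [sum_members _ _ _ members_NA, sum_members _ _ _ members_LA, sum_members _ _ _ members_AP,
      sum_members _ _ _ members_EU, sum_members _ _ _ members_ME]
  simp only [bridge]
  simp [mk5]
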